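-- pv_equiv track=rewrite | github.com/paiml/depyler | examples/hard_wave3_057.py | same_degree_sequence
-- ===== SOURCE A (Python) =====
-- from typing import Dict, List, Tuple
--
-- def degree_sequence(adj: Dict[int, List[int]], n: int) -> List[int]:
--     """Get sorted degree sequence."""
--     degs: List[int] = []
--     i: int = 0
--     while i < n:
--         if i in adj:
--             degs.append(len(adj[i]))
--         else:
--             degs.append(0)
--         i += 1
--     nd: int = len(degs)
--     i = 0
--     while i < nd:
--         j: int = 0
--         lim: int = nd - i - 1
--         while j < lim:
--             if degs[j] > degs[j + 1]:
--                 temp: int = degs[j]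
--                 degs[j] = degs[j + 1]
--                 degs[j + 1] = temp
--             j += 1
--         i += 1
--     return degs
--
-- def same_degree_sequence(adj1: Dict[int, List[int]], n1: int,
--                          adj2: Dict[int, List[int]], n2: int) -> bool:
--     """Check if two graphs have same degree sequence."""
--     if n1 != n2:
--         return False
--     ds1: List[int] = degree_sequence(adj1, n1)
--     ds2: List[int] = degree_sequence(adj2, n2)
--     i: int = 0
--     while i < n1:
--         if ds1[i] != ds2[i]:
--             return False
--         i += 1
--     return True
-- ===== SOURCE B (Python) =====
-- def degree_counts(adj, n):
--     """Frequency map degree -> how many vertices have that degree."""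
--     counts = {}
--     for i in range(n):
--         d = len(adj.get(i, []))
--         counts[d] = counts.get(d, 0) + 1
--     return counts
--
--
-- def same_degree_sequence(adj1, n1, adj2, n2):
--     """Check if two graphs have same degree sequence."""
--     if n1 != n2:
--         return False
--     return degree_counts(adj1, n1) == degree_counts(adj2, n2)
-- ===== Notes on version B (the rewrite author's own statement) =====
-- stated objective: simpler
-- what changed: Replaces the bubble sort of both degree lists plus the indexed elementwise comparison by a single pass per graph that builds a degree->count frequency dict, comparing the two dicts for (order-insensitive) equality, i.e. multiset equality without sorting.
import Mathlib
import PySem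

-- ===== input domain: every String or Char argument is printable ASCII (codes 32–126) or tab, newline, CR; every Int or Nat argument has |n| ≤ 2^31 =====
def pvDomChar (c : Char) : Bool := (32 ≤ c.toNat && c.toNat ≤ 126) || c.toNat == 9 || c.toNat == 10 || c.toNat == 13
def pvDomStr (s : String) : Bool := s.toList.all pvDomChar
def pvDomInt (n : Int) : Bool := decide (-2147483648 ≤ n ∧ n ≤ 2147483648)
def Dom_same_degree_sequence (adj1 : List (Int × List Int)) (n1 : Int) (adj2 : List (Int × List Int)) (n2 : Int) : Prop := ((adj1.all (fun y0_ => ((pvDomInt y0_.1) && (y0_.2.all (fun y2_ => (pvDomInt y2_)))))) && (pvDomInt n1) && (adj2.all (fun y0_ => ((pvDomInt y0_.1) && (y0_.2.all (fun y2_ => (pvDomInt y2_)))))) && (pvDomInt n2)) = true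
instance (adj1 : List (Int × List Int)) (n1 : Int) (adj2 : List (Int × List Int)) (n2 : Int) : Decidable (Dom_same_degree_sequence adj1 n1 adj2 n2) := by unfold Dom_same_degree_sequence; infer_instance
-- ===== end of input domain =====

-- B replaces A's bubble sort of both degree lists + indexed comparison by one
-- frequency dict (degree -> count) per graph and an order-insensitive dict
-- comparison (multiset equality without sorting); objective: simpler.

-- ===== PORT A =====
-- port of degree_sequence: build degs by the index loop, then bubble-sort it in place
def degree_sequence (adj : List (Int × List Int)) (n : Int) : List Int :=
  let degs : List Int :=
    (PySem.List.pyRange 0 n 1).foldl (fun degs i =>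
      if (PySem.Dict.mk adj).contains i then
        degs ++ [(((PySem.Dict.mk adj).getD i []).length : Int)]
      else
        degs ++ [(0 : Int)]) []
  let nd : Int := degs.length
  (PySem.List.pyRange 0 nd 1).foldl (fun degs i =>
    (PySem.List.pyRange 0 (nd - i - 1) 1).foldl (fun degs j =>
      if PySem.List.pyGetD degs (j + 1) 0 < PySem.List.pyGetD degs j 0 then
        PySem.List.pySetD
          (PySem.List.pySetD degs j (PySem.List.pyGetD degs (j + 1) 0))
          (j + 1) (PySem.List.pyGetD degs j 0)
      else degs) degs) degs

def same_degree_sequence (adj1 : List (Int × List Int)) (n1 : Int) (adj2 : List (Int × List Int)) (n2 : Int) : Bool :=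
  if n1 ≠ n2 then false
  else
    let ds1 := degree_sequence adj1 n1
    let ds2 := degree_sequence adj2 n2
    (PySem.List.pyRange 0 n1 1).all (fun i =>
      PySem.List.pyGetD ds1 i 0 == PySem.List.pyGetD ds2 i 0)

-- ===== PORT B =====
-- port of degree_counts: one pass building the frequency dict degree -> count
def degree_counts (adj : List (Int × List Int)) (n : Int) : PySem.Dict Int Int :=
  (PySem.List.pyRange 0 n 1).foldl (fun counts i =>
    let d : Int := ((PySem.Dict.mk adj).getD i []).length
    counts.insert d (counts.getD d 0 + 1)) PySem.Dict.empty

-- port of Python's order-insensitive '==' on dicts (same keys, same values)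
def pyDictEq (d1 d2 : PySem.Dict Int Int) : Bool :=
  d1.size == d2.size && d1.items.all (fun kv => d2.get? kv.1 == some kv.2)

def same_degree_sequence_alt (adj1 : List (Int × List Int)) (n1 : Int) (adj2 : List (Int × List Int)) (n2 : Int) : Bool :=
  if n1 ≠ n2 then false
  else pyDictEq (degree_counts adj1 n1) (degree_counts adj2 n2)

-- ===== PRECONDITION & SPEC =====
def Spec_same_degree_sequence (adj1 : List (Int × List Int)) (n1 : Int) (adj2 : List (Int × List Int)) (n2 : Int) (out : Bool) : Prop := out = same_degree_sequence_alt adj1 n1 adj2 n2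
instance (adj1 : List (Int × List Int)) (n1 : Int) (adj2 : List (Int × List Int)) (n2 : Int) (out : Bool) : Decidable (Spec_same_degree_sequence adj1 n1 adj2 n2 out) := by unfold Spec_same_degree_sequence; infer_instance

-- ===== CLAIM (what is proved, stated in full; the proofs are below) =====
def Claim_equal_same_degree_sequence : Prop := ∀ (adj1 : List (Int × List Int)) (n1 : Int) (adj2 : List (Int × List Int)) (n2 : Int), Dom_same_degree_sequence adj1 n1 adj2 n2 → Spec_same_degree_sequence adj1 n1 adj2 n2 (same_degree_sequence adj1 n1 adj2 n2)

-- ===== LEMMAS AND PROOFS =====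

-- the degree list both programs are about: degree of vertex i for i = 0..n-1
def pvDeg (adj : List (Int × List Int)) (i : Int) : Int :=
  (((PySem.Dict.mk adj).getD i []).length : Int)

def pvDegList (adj : List (Int × List Int)) (n : Int) : List Int :=
  List.map (fun k : Nat => pvDeg adj (k : Int)) (List.range n.toNat)

-- Nat-indexed model of A's bubble sort
def pvBStep (l : List Int) (j : Nat) : List Int :=
  if l.getD (j + 1) 0 < l.getD j 0 then
    (l.set j (l.getD (j + 1) 0)).set (j + 1) (l.getD j 0)
  else l

def pvBPass (l : List Int) (lim : Nat) : List Int :=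
  (List.range lim).foldl pvBStep l

def pvBSort (l : List Int) : List Int :=
  (List.range l.length).foldl (fun s i => pvBPass s (l.length - i - 1)) l

-- a dict lookup at an absent key yields the default
theorem pv_getD_of_not_contains {ν : Type} (d : PySem.Dict Int ν) (k : Int) (dflt : ν)
    (h : d.contains k = false) : d.getD k dflt = dflt := by
  simp [PySem.Dict.getD, PySem.Dict.get?, PySem.Dict.contains] at *
  rw [List.find?_eq_none.2]
  · rfl
  · intro p hp; simpa using h p.1 p.2 hp

theorem pv_mk_map_get? (l : List Int) (f : Int → Int) (x : Int) :
    (PySem.Dict.mk (l.map fun k => (k, f k))).get? x = if x ∈ l then some (f x) else none := by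
  induction l with
  | nil => simp [PySem.Dict.get?]
  | cons a t ih =>
    simp only [List.map_cons, PySem.Dict.get?_mk_cons, ih]
    by_cases hax : a = x
    · subst hax; simp
    · by_cases hx : x ∈ t <;> simp [hx, hax, Ne.symm hax]

theorem pv_get?_counter (xs : List Int) (k : Int) :
    (PySem.Dict.counter xs).get? k = if k ∈ xs then some ((xs.count k : Int)) else none := by
  have h : PySem.Dict.counter xs
      = PySem.Dict.mk ((PySem.Set.ofList xs).map fun k => (k, (xs.count k : Int))) :=
    PySem.Dict.ext (by simpa using PySem.Dict.items_counter xs)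
  rw [h, pv_mk_map_get?]
  simp [PySem.Set.mem_ofList]

-- A's degree-building loop produces pvDegList
theorem pv_degsA (adj : List (Int × List Int)) (n : Int) :
    ((PySem.List.pyRange 0 n 1).foldl (fun degs i =>
      if (PySem.Dict.mk adj).contains i then
        degs ++ [(((PySem.Dict.mk adj).getD i []).length : Int)]
      else
        degs ++ [(0 : Int)]) []) = pvDegList adj n := by
  have hfn : (fun (degs : List Int) (i : Int) =>
      if (PySem.Dict.mk adj).contains i then
        degs ++ [(((PySem.Dict.mk adj).getD i []).length : Int)]
      else degs ++ [(0 : Int)]) = fun degs i => degs ++ [pvDeg adj i] := by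
    funext degs i
    by_cases h : (PySem.Dict.mk adj).contains i
    · simp [h, pvDeg]
    · simp only [Bool.not_eq_true] at h
      simp [h, pvDeg, pv_getD_of_not_contains _ _ _ h]
  rw [hfn]
  by_cases hn : n ≤ 0
  · rw [PySem.List.pyRange_one_eq_nil hn]
    simp [pvDegList, Int.toNat_of_nonpos hn]
  · obtain ⟨m, hm⟩ : ∃ m : Nat, n = (m : Int) := ⟨n.toNat, by omega⟩
    subst hm
    rw [PySem.List.pyRange_zero_natCast, List.foldl_map, pvDegList,
      PySem.List.foldl_append_singleton_eq_map (fun k : Nat => pvDeg adj (k : Int)) (List.range m) []]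
    simp only [List.nil_append, Int.toNat_natCast]

-- B's one pass builds the counter of pvDegList
theorem pv_degree_counts_eq (adj : List (Int × List Int)) (n : Int) :
    degree_counts adj n = PySem.Dict.counter (pvDegList adj n) := by
  unfold degree_counts
  by_cases hn : n ≤ 0
  · rw [PySem.List.pyRange_one_eq_nil hn]
    simp [pvDegList, Int.toNat_of_nonpos hn]
    rfl
  · obtain ⟨m, hm⟩ : ∃ m : Nat, n = (m : Int) := ⟨n.toNat, by omega⟩
    subst hm
    rw [PySem.List.pyRange_zero_natCast, List.foldl_map, pvDegList,
      ← PySem.Dict.foldl_insert_getD_add_one_eq_counter]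
    simp only [Int.toNat_natCast, List.foldl_map]
    rfl

-- pyDictEq on counters is multiset equality
theorem pv_pyDictEq_counter (xs ys : List Int) :
    pyDictEq (PySem.Dict.counter xs) (PySem.Dict.counter ys) = true ↔ xs.Perm ys := by
  have hsz : (PySem.Dict.counter xs).size = (PySem.Set.ofList xs).length := by
    simp [PySem.Dict.size, PySem.Dict.items_counter]
  have hsz' : (PySem.Dict.counter ys).size = (PySem.Set.ofList ys).length := by
    simp [PySem.Dict.size, PySem.Dict.items_counter]
  constructor
  · intro h
    simp only [pyDictEq, Bool.and_eq_true, beq_iff_eq, List.all_eq_true] at h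
    obtain ⟨hsize, hvals⟩ := h
    rw [hsz, hsz'] at hsize
    have hx : ∀ k ∈ xs, k ∈ ys ∧ ys.count k = xs.count k := by
      intro k hk
      have := hvals (k, (xs.count k : Int)) (by
        rw [PySem.Dict.items_counter]
        exact List.mem_map.2 ⟨k, (PySem.Set.mem_ofList xs k).2 hk, rfl⟩)
      rw [pv_get?_counter] at this
      by_cases hky : k ∈ ys
      · refine ⟨hky, ?_⟩
        simp only [hky, if_true, Option.some.injEq] at this
        exact_mod_cast this
      · simp [hky] at this
    have hsub : PySem.Set.ofList xs ⊆ PySem.Set.ofList ys := by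
      intro k hk
      exact (PySem.Set.mem_ofList ys k).2 (hx k ((PySem.Set.mem_ofList xs k).1 hk)).1
    have hperm : (PySem.Set.ofList xs).Perm (PySem.Set.ofList ys) :=
      ((PySem.Set.nodup_ofList xs).subperm hsub).perm_of_length_le (le_of_eq hsize.symm)
    refine List.perm_iff_count.2 (fun k => ?_)
    by_cases hk : k ∈ xs
    · exact (hx k hk).2.symm
    · have hky : k ∉ ys := by
        intro hky
        exact hk ((PySem.Set.mem_ofList xs k).1 (hperm.mem_iff.2 ((PySem.Set.mem_ofList ys k).2 hky)))
      simp [List.count_eq_zero_of_not_mem, hk, hky]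
  · intro h
    simp only [pyDictEq, Bool.and_eq_true, beq_iff_eq, List.all_eq_true]
    constructor
    · rw [hsz, hsz']
      exact List.Perm.length_eq ((List.perm_ext_iff_of_nodup (PySem.Set.nodup_ofList xs)
        (PySem.Set.nodup_ofList ys)).2 (fun a => by
          rw [PySem.Set.mem_ofList, PySem.Set.mem_ofList]; exact h.mem_iff))
    · intro kv hkv
      rw [PySem.Dict.items_counter] at hkv
      obtain ⟨k, hk, rfl⟩ := List.mem_map.1 hkv
      have hkx : k ∈ xs := (PySem.Set.mem_ofList xs k).1 hk
      rw [pv_get?_counter]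
      simp [h.mem_iff.1 hkx, List.Perm.count_eq h]

-- A's final loop decides list equality (for equal-length lists)
theorem pv_cmp_eq (ds1 ds2 : List Int) (n : Int) (hn : 0 ≤ n)
    (h1 : ds1.length = n.toNat) (h2 : ds2.length = n.toNat) :
    ((PySem.List.pyRange 0 n 1).all (fun i =>
      PySem.List.pyGetD ds1 i 0 == PySem.List.pyGetD ds2 i 0)) = decide (ds1 = ds2) := by
  obtain ⟨m, hm⟩ : ∃ m : Nat, n = (m : Int) := ⟨n.toNat, by omega⟩
  subst hm
  simp only [Int.toNat_natCast] at h1 h2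
  rw [PySem.List.pyRange_zero_natCast, List.all_map]
  have hfn : ((fun i => PySem.List.pyGetD ds1 i 0 == PySem.List.pyGetD ds2 i 0) ∘ (fun k : Nat => (k : Int)))
      = fun k : Nat => ds1.getD k 0 == ds2.getD k 0 := by
    funext k
    simp [Function.comp, PySem.List.pyGetD_natCast]
  rw [hfn]
  by_cases he : ds1 = ds2
  · subst he; simp
  · simp only [he, decide_false]
    by_contra hall
    simp only [Bool.not_eq_false, List.all_eq_true, List.mem_range, beq_iff_eq] at hall
    apply he
    apply List.ext_getElem (by omega)
    intro i hi1 hi2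
    have := hall i (by omega)
    rwa [List.getD_eq_getElem _ _ hi1, List.getD_eq_getElem _ _ hi2] at this

-- getD after set
theorem pv_getD_set (l : List Int) (i j : Nat) (v d : Int) :
    (l.set i v).getD j d = if i = j ∧ i < l.length then v else l.getD j d := by
  rw [List.getD_eq_getElem?_getD, List.getElem?_set, List.getD_eq_getElem?_getD]
  by_cases hij : i = j
  · subst hij
    by_cases hl : i < l.length
    · simp [hl]
    · rw [if_pos rfl, if_neg hl, if_neg (by omega)]
      rw [List.getElem?_eq_none (by omega)]
  · simp [hij]

theorem pv_swap_perm : ∀ (l : List Int) (j : Nat), j + 1 < l.length →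
    ((l.set j (l.getD (j + 1) 0)).set (j + 1) (l.getD j 0)).Perm l := by
  intro l j
  induction j generalizing l with
  | zero =>
    intro h
    match l, h with
    | a :: b :: t, _ => simpa using List.Perm.swap a b t
  | succ j ih =>
    intro h
    match l, h with
    | a :: t, h =>
      have := ih t (by simpa using h)
      simpa using this.cons a

theorem pv_bstep_perm (l : List Int) (j : Nat) (h : j + 1 < l.length) :
    (pvBStep l j).Perm l := by
  unfold pvBStep
  split
  · exact pv_swap_perm l j h
  · exact List.Perm.refl l

theorem pv_bstep_getD_untouched (l : List Int) (j k : Nat) (hk : k ≠ j) (hk2 : k ≠ j + 1) :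
    (pvBStep l j).getD k 0 = l.getD k 0 := by
  unfold pvBStep
  split
  · rw [pv_getD_set, pv_getD_set, if_neg (by omega), if_neg (by omega)]
  · rfl

-- one bubble pass: keeps the multiset, leaves positions > lim alone, puts a maximum at lim
theorem pv_bpass_inv (l : List Int) (lim : Nat) (h : lim < l.length) :
    (pvBPass l lim).Perm l ∧
    (∀ k, lim < k → (pvBPass l lim).getD k 0 = l.getD k 0) ∧
    (∀ k, k ≤ lim → (pvBPass l lim).getD k 0 ≤ (pvBPass l lim).getD lim 0) := by
  induction lim with
  | zero =>
    exact ⟨by simp [pvBPass], fun k hk => by simp [pvBPass], fun k hk => by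
      simp [Nat.le_zero.1 hk, pvBPass]⟩
  | succ lim ih =>
    obtain ⟨hperm, huntouched, hmax⟩ := ih (by omega)
    have hstep : pvBPass l (lim + 1) = pvBStep (pvBPass l lim) lim := by
      unfold pvBPass
      rw [List.range_succ, List.foldl_append, List.foldl_cons, List.foldl_nil]
    set r := pvBPass l lim with hr
    have hrlen : r.length = l.length := hperm.length_eq
    have hlim1 : lim + 1 < r.length := by omega
    refine ⟨?_, ?_, ?_⟩
    · rw [hstep]; exact (pv_bstep_perm r lim (by omega)).trans hperm
    · intro k hk
      rw [hstep, pv_bstep_getD_untouched r lim k (by omega) (by omega)]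
      exact huntouched k (by omega)
    · intro k hk
      rw [hstep]
      unfold pvBStep
      by_cases hc : r.getD (lim + 1) 0 < r.getD lim 0
      · rw [if_pos hc]
        have hlen : (r.set lim (r.getD (lim + 1) 0)).length = r.length := by simp
        have hset : ∀ m, ((r.set lim (r.getD (lim + 1) 0)).set (lim + 1) (r.getD lim 0)).getD m 0 =
            if m = lim + 1 then r.getD lim 0 else if m = lim then r.getD (lim + 1) 0 else r.getD m 0 := by
          intro m
          rw [pv_getD_set, pv_getD_set, hlen]
          split_ifs <;> first | rfl | (exfalso; omega)
        rw [hset, hset, if_pos rfl]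
        split_ifs with h1 h2
        · exact le_refl _
        · exact le_of_lt hc
        · exact hmax k (by omega)
      · rw [if_neg hc]
        push_neg at hc
        by_cases h1 : k = lim + 1
        · simp [h1]
        · exact le_trans (hmax k (by omega)) hc

theorem pv_drop_eq_of_getD_eq (s' s : List Int) (t : Nat) (hlen : s'.length = s.length)
    (h : ∀ k, t ≤ k → s'.getD k 0 = s.getD k 0) : s'.drop t = s.drop t := by
  apply List.ext_getElem (by simp [hlen])
  intro i hi1 hi2
  rw [List.getElem_drop, List.getElem_drop]
  have := h (t + i) (by omega)
  rwa [List.getD_eq_getElem _ _ (by simp at hi1; omega),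
       List.getD_eq_getElem _ _ (by simp at hi2; omega)] at this

theorem pv_take_perm (s' s : List Int) (t : Nat) (hperm : s'.Perm s)
    (h : ∀ k, t ≤ k → s'.getD k 0 = s.getD k 0) : (s'.take t).Perm (s.take t) := by
  have hd : s'.drop t = s.drop t := pv_drop_eq_of_getD_eq s' s t hperm.length_eq h
  have h1 : s'.take t ++ s'.drop t = s' := List.take_append_drop t s'
  have h2 : s.take t ++ s.drop t = s := List.take_append_drop t s
  rw [← List.perm_append_right_iff (s.drop t)]
  rw [← hd, h1]
  rw [hd, h2]
  exact hperm

-- outer loop invariant: after m passes the last m positions are sorted and dominate the rest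
theorem pv_bsort_aux (l : List Int) (m : Nat) (hm : m ≤ l.length) :
    ((List.range m).foldl (fun s i => pvBPass s (l.length - i - 1)) l).Perm l ∧
    (∀ p q, p ≤ q → q < l.length → l.length - m ≤ q →
      ((List.range m).foldl (fun s i => pvBPass s (l.length - i - 1)) l).getD p 0 ≤
      ((List.range m).foldl (fun s i => pvBPass s (l.length - i - 1)) l).getD q 0) := by
  induction m with
  | zero =>
    refine ⟨by simp, fun p q hpq hq hge => ?_⟩
    omega
  | succ m ih =>
    obtain ⟨hperm, hsorted⟩ := ih (by omega)
    set s := (List.range m).foldl (fun s i => pvBPass s (l.length - i - 1)) l with hs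
    have hstep : (List.range (m + 1)).foldl (fun s i => pvBPass s (l.length - i - 1)) l
        = pvBPass s (l.length - m - 1) := by
      rw [List.range_succ, List.foldl_append, List.foldl_cons, List.foldl_nil]
    set lim := l.length - m - 1 with hlim
    have hslen : s.length = l.length := hperm.length_eq
    have hliml : lim < s.length := by omega
    obtain ⟨hperm', huntouched, hmax⟩ := pv_bpass_inv s lim hliml
    rw [hstep]
    refine ⟨hperm'.trans hperm, fun p q hpq hq hge => ?_⟩
    have hge' : lim ≤ q := by omega
    rcases Nat.eq_or_lt_of_le hge' with hq_eq | hq_gt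
    · exact hq_eq ▸ hmax p (by omega)
    · have hsq : (pvBPass s lim).getD q 0 = s.getD q 0 := huntouched q hq_gt
      by_cases hp : lim < p
      · rw [hsq, huntouched p hp]
        exact hsorted p q hpq hq (by omega)
      · push_neg at hp
        have h1 : (pvBPass s lim).getD p 0 ≤ (pvBPass s lim).getD lim 0 := hmax p hp
        have htp : ((pvBPass s lim).take (lim + 1)).Perm (s.take (lim + 1)) :=
          pv_take_perm _ _ _ hperm' (fun k hk => huntouched k (by omega))
        have hlen' : (pvBPass s lim).length = s.length := hperm'.length_eq
        have hmem : (pvBPass s lim).getD lim 0 ∈ (pvBPass s lim).take (lim + 1) := by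
          rw [List.getD_eq_getElem _ _ (by omega)]
          have : ((pvBPass s lim).take (lim + 1))[lim]'(by simp; omega) = (pvBPass s lim)[lim]'(by omega) :=
            List.getElem_take
          rw [← this]
          exact List.getElem_mem _
        have hmem' : (pvBPass s lim).getD lim 0 ∈ s.take (lim + 1) := htp.mem_iff.1 hmem
        obtain ⟨k0, hk0, hk0v⟩ := List.mem_iff_getElem.1 hmem'
        have hk0lt : k0 ≤ lim := by simp at hk0; omega
        have hk0v' : (pvBPass s lim).getD lim 0 = s.getD k0 0 := by
          rw [← hk0v, List.getElem_take, List.getD_eq_getElem _ _ (by omega)]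
        calc (pvBPass s lim).getD p 0 ≤ (pvBPass s lim).getD lim 0 := h1
          _ = s.getD k0 0 := hk0v'
          _ ≤ s.getD q 0 := hsorted k0 q (by omega) hq (by omega)
          _ = (pvBPass s lim).getD q 0 := hsq.symm

theorem pv_bsort_perm (l : List Int) : (pvBSort l).Perm l :=
  (pv_bsort_aux l l.length (le_refl _)).1

theorem pv_bsort_sorted (l : List Int) : (pvBSort l).Pairwise (· ≤ ·) := by
  obtain ⟨hperm, hsorted⟩ := pv_bsort_aux l l.length (le_refl _)
  rw [List.pairwise_iff_getElem]
  intro i j hi hj hij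
  have hlen : ((List.range l.length).foldl (fun s i => pvBPass s (l.length - i - 1)) l).length = l.length :=
    hperm.length_eq
  have hj' : j < l.length := by
    have : (pvBSort l).length = ((List.range l.length).foldl (fun s i => pvBPass s (l.length - i - 1)) l).length := rfl
    omega
  have h := hsorted i j (by omega) hj' (by omega)
  rwa [List.getD_eq_getElem _ _ (by omega), List.getD_eq_getElem _ _ (by omega)] at h

-- A's bubble-sort loops are pvBSort
theorem pv_sortA (l : List Int) :
    ((PySem.List.pyRange 0 (l.length : Int) 1).foldl (fun degs i =>
      (PySem.List.pyRange 0 ((l.length : Int) - i - 1) 1).foldl (fun degs j =>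
        if PySem.List.pyGetD degs (j + 1) 0 < PySem.List.pyGetD degs j 0 then
          PySem.List.pySetD
            (PySem.List.pySetD degs j (PySem.List.pyGetD degs (j + 1) 0))
            (j + 1) (PySem.List.pyGetD degs j 0)
        else degs) degs) l) = pvBSort l := by
  rw [PySem.List.pyRange_zero_natCast, List.foldl_map]
  unfold pvBSort
  apply PySem.List.foldl_congr_mem
  intro degs k hk
  have hk' : k < l.length := List.mem_range.1 hk
  have hcast : (l.length : Int) - (k : Int) - 1 = ((l.length - k - 1 : Nat) : Int) := by omega
  rw [hcast, PySem.List.pyRange_zero_natCast, List.foldl_map]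
  unfold pvBPass
  apply PySem.List.foldl_congr_mem
  intro s j _
  have hj1 : ((j : Int) + 1) = ((j + 1 : Nat) : Int) := by omega
  rw [hj1, PySem.List.pyGetD_natCast, PySem.List.pyGetD_natCast,
      PySem.List.pySetD_natCast, PySem.List.pySetD_natCast]
  rfl

theorem pv_degree_sequence_eq (adj : List (Int × List Int)) (n : Int) :
    degree_sequence adj n = pvBSort (pvDegList adj n) := by
  unfold degree_sequence
  rw [pv_degsA]
  exact pv_sortA (pvDegList adj n)

-- bubble-sorted lists are equal iff the inputs are permutations of each other
theorem pv_bsort_eq_iff (xs ys : List Int) :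
    pvBSort xs = pvBSort ys ↔ xs.Perm ys := by
  constructor
  · intro h
    exact (pv_bsort_perm xs).symm.trans (h ▸ (pv_bsort_perm ys))
  · intro h
    exact List.eq_of_perm_of_sorted (fun a b _ _ h1 h2 => le_antisymm h1 h2)
      (pv_bsort_sorted xs) (pv_bsort_sorted ys)
      (((pv_bsort_perm xs).trans h).trans (pv_bsort_perm ys).symm)

theorem pv_length_degList (adj : List (Int × List Int)) (n : Int) :
    (pvDegList adj n).length = n.toNat := by
  simp [pvDegList]

-- ===== VERDICT (by name: the statement is the Claim_ definition above) =====
theorem same_degree_sequence_spec : Claim_equal_same_degree_sequence := by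
  intro adj1 n1 adj2 n2 _
  unfold Spec_same_degree_sequence same_degree_sequence same_degree_sequence_alt
  by_cases hne : n1 ≠ n2
  · simp [hne]
  · push_neg at hne
    subst hne
    simp only [ne_eq, not_true_eq_false, if_false]
    rw [pv_degree_sequence_eq, pv_degree_sequence_eq, pv_degree_counts_eq, pv_degree_counts_eq]
    by_cases hn : 0 ≤ n1
    · rw [pv_cmp_eq _ _ n1 hn
        (by rw [(pv_bsort_perm _).length_eq, pv_length_degList])
        (by rw [(pv_bsort_perm _).length_eq, pv_length_degList])]
      have hiff := (pv_bsort_eq_iff (pvDegList adj1 n1) (pvDegList adj2 n1)).trans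
        (pv_pyDictEq_counter (pvDegList adj1 n1) (pvDegList adj2 n1)).symm
      cases hb : pyDictEq (PySem.Dict.counter (pvDegList adj1 n1)) (PySem.Dict.counter (pvDegList adj2 n1))
      · simp only [decide_eq_false_iff_not]
        intro heq
        have ht := hiff.1 heq
        rw [hb] at ht
        exact Bool.false_ne_true ht
      · simp only [decide_eq_true_eq]
        exact hiff.2 hb
    · push_neg at hn
      rw [PySem.List.pyRange_one_eq_nil (by omega)]
      have hd : pvDegList adj1 n1 = [] := by
        simp [pvDegList, Int.toNat_of_nonpos (by omega : n1 ≤ 0)]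
      have hd2 : pvDegList adj2 n1 = [] := by
        simp [pvDegList, Int.toNat_of_nonpos (by omega : n1 ≤ 0)]
      rw [hd, hd2]
      exact ((pv_pyDictEq_counter [] []).2 (List.Perm.refl [])).symm
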